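-- pv_equiv track=rewrite | github.com/necrotmoo/bookbot | stats.py | get_sort_list
-- ===== SOURCE A (Python) =====
-- def get_sort_list(dict_list):
-- 	sorted_list = {}
-- 	char = {}
-- 	sorted_dict = {}
-- 	for k, v in dict_list.items():
-- 		if k.isalpha() == True:
-- 			sorted_list[k] = v
--
-- 	char = sorted(sorted_list, key=str)
-- 	for c in char:
-- 		for k, v in dict_list.items():
-- 			if c == k:
-- 				sorted_dict[f"{k}"] = f"{v}"
--
--
--
-- 	return sorted_dict
-- ===== SOURCE B (Python) =====
-- def get_sort_list(dict_list):
-- 	items = sorted(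
-- 		((k, str(v)) for k, v in dict_list.items() if k.isalpha()),
-- 		key=lambda p: p[0],
-- 	)
-- 	return dict(items)
-- ===== Notes on version B (the rewrite author's own statement) =====
-- stated objective: faster
-- what changed: B filters and stringifies the items in one pass and sorts them by key directly, instead of A's separate key-sort followed by a full rescan of the whole dict for every sorted key.
import Mathlib
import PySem

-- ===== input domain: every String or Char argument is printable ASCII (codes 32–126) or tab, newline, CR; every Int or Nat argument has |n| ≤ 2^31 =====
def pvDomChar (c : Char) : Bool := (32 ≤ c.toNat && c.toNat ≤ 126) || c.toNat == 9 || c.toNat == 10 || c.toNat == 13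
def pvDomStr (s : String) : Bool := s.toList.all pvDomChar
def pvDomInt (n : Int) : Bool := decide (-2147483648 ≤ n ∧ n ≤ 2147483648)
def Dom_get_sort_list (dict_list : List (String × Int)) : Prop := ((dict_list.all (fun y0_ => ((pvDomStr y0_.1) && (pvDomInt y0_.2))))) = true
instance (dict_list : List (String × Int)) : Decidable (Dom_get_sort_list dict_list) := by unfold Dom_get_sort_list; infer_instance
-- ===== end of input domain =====

-- B replaces A's per-key rescan of the whole dict by one filtered, key-sorted pass (objective: faster).

-- ===== PORT A =====
def get_sort_list (dict_list : List (String × Int)) : List (String × String) :=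
  let d := PySem.Dict.ofList dict_list
  let sorted_list : PySem.Dict String Int :=
    d.items.foldl (fun sl p => if PySem.Str.strIsalpha p.1 = true then sl.insert p.1 p.2 else sl)
      PySem.Dict.empty
  let char := PySem.List.sorted sorted_list.keys (fun s => s) false
  let sorted_dict : PySem.Dict String String :=
    char.foldl (fun sd c =>
      d.items.foldl (fun sd p => if c = p.1 then sd.insert p.1 (PySem.Int.toStr p.2) else sd) sd)
      PySem.Dict.empty
  sorted_dict.items

-- ===== PORT B =====
def get_sort_list_alt (dict_list : List (String × Int)) : List (String × String) :=
  let d := PySem.Dict.ofList dict_list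
  let items := PySem.List.sorted
    ((d.items.filter (fun p => PySem.Str.strIsalpha p.1)).map (fun p => (p.1, PySem.Int.toStr p.2)))
    (fun p => p.1) false
  (PySem.Dict.ofList items).items

-- ===== PRECONDITION & SPEC =====
def Spec_get_sort_list (dict_list : List (String × Int)) (out : List (String × String)) : Prop := out = get_sort_list_alt dict_list
instance (dict_list : List (String × Int)) (out : List (String × String)) : Decidable (Spec_get_sort_list dict_list out) := by unfold Spec_get_sort_list; infer_instance

-- ===== CLAIM (what is proved, stated in full; the proofs are below) =====
def Claim_equal_get_sort_list : Prop := ∀ (dict_list : List (String × Int)), Dom_get_sort_list dict_list → Spec_get_sort_list dict_list (get_sort_list dict_list)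

-- ===== LEMMAS AND PROOFS =====

theorem foldl_if_filter {α β : Type} (l : List α) (c : α → Bool) (f : β → α → β) (init : β) :
    l.foldl (fun s p => if c p = true then f s p else s) init = (l.filter c).foldl f init := by
  induction l generalizing init with
  | nil => rfl
  | cons x xs ih =>
      by_cases h : c x = true <;> simp [List.filter, h, ih]

theorem foldl_if_filter' {α β : Type} (l : List α) (P : α → Prop) [DecidablePred P]
    (f : β → α → β) (init : β) :
    l.foldl (fun s p => if P p then f s p else s) init
      = (l.filter (fun p => decide (P p))).foldl f init := by
  induction l generalizing init with
  | nil => rfl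
  | cons x xs ih =>
      by_cases h : P x <;> simp [List.filter, h, ih]

theorem filter_key_single {ν : Type} (l : List (String × ν)) (c : String) (v : ν)
    (hnd : (l.map Prod.fst).Nodup) (hm : (c, v) ∈ l) :
    l.filter (fun p => decide (c = p.1)) = [(c, v)] := by
  induction l with
  | nil => cases hm
  | cons x xs ih =>
      simp only [List.map_cons, List.nodup_cons] at hnd
      rcases List.mem_cons.mp hm with h | h
      · subst h
        have : xs.filter (fun p => decide (c = p.1)) = [] := by
          apply List.filter_eq_nil_iff.mpr
          intro p hp hc
          exact hnd.1 (by simpa using (List.mem_map.mpr ⟨p, hp, (of_decide_eq_true hc).symm⟩))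
        simp [List.filter, this]
      · have hne : c ≠ x.1 := by
          intro heq
          exact hnd.1 (List.mem_map.mpr ⟨(c, v), h, heq⟩)
        simp [List.filter, hne, ih hnd.2 h]

theorem foldl_congr_mem' {α β : Type} (l : List α) (f g : β → α → β) (init : β)
    (h : ∀ s, ∀ x ∈ l, f s x = g s x) : l.foldl f init = l.foldl g init := by
  induction l generalizing init with
  | nil => rfl
  | cons x xs ih =>
      simp only [List.foldl_cons, h init x (by simp)]
      exact ih _ (fun s y hy => h s y (by simp [hy]))

theorem pairwise_lt_of_sorted_nodup (xs : List String) (h : xs.Nodup) :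
    (PySem.List.sorted xs (fun s => s) false).Pairwise (· < ·) := by
  have hle := PySem.List.sorted_pairwise xs (fun s => s)
  have hnd : (PySem.List.sorted xs (fun s => s) false).Nodup :=
    (PySem.List.sorted_perm xs (fun s => s) false).nodup_iff.mpr h
  exact (hle.and hnd).imp (fun hp => lt_of_le_of_ne hp.1 hp.2)

theorem items_ofList_of_nodup {ν : Type} (l : List (String × ν))
    (h : (l.map Prod.fst).Nodup) : (PySem.Dict.ofList l).items = l := by
  simp only [PySem.Dict.ofList, PySem.Dict.update]
  rw [PySem.Dict.items_foldl_insert_fresh l Prod.fst Prod.snd PySem.Dict.empty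
    (fun a _ => PySem.Dict.contains_empty a.1) h]
  simp [PySem.Dict.empty]

theorem get_sort_list_eq (dict_list : List (String × Int)) :
    get_sort_list dict_list = get_sort_list_alt dict_list := by
  unfold get_sort_list get_sort_list_alt
  dsimp only
  set d := PySem.Dict.ofList dict_list with hd
  have hknd : (d.items.map Prod.fst).Nodup := PySem.Dict.nodup_keys_ofList dict_list
  set F := d.items.filter (fun p => PySem.Str.strIsalpha p.1) with hF
  have hFnd : (F.map Prod.fst).Nodup := hknd.sublist ((List.filter_sublist).map Prod.fst)
  -- A, step 1: the filtered dict's items are exactly F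
  have h1 : (d.items.foldl
      (fun sl p => if PySem.Str.strIsalpha p.1 = true then sl.insert p.1 p.2 else sl)
      PySem.Dict.empty)
      = F.foldl (fun sl p => sl.insert p.1 p.2) PySem.Dict.empty :=
    foldl_if_filter d.items _ _ _
  have h2 : (F.foldl (fun sl p => sl.insert p.1 p.2) PySem.Dict.empty).items = F := by
    rw [PySem.Dict.items_foldl_insert_fresh F Prod.fst Prod.snd PySem.Dict.empty
      (fun a _ => PySem.Dict.contains_empty a.1) hFnd]
    simp [PySem.Dict.empty]
  rw [h1]
  have hkeys : (F.foldl (fun sl p => sl.insert p.1 p.2) PySem.Dict.empty).keys = F.map Prod.fst := by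
    simp only [PySem.Dict.keys, h2]
  rw [hkeys]
  set char := PySem.List.sorted (F.map Prod.fst) (fun s => s) false with hchar
  have hcp : char.Perm (F.map Prod.fst) := PySem.List.sorted_perm _ _ _
  have hcnd : char.Nodup := hcp.nodup_iff.mpr hFnd
  have hclt : char.Pairwise (· < ·) := pairwise_lt_of_sorted_nodup _ hFnd
  -- A, step 2: each inner rescan is a single insert
  have h3 : char.foldl
      (fun sd c => d.items.foldl
        (fun sd p => if c = p.1 then sd.insert p.1 (PySem.Int.toStr p.2) else sd) sd)
      PySem.Dict.empty
      = char.foldl (fun sd c => sd.insert c (PySem.Int.toStr (d.getD c 0))) PySem.Dict.empty := by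
    apply foldl_congr_mem'
    intro sd c hc
    have hcF : c ∈ F.map Prod.fst := hcp.mem_iff.mp hc
    obtain ⟨p, hpF, hpc⟩ := List.mem_map.mp hcF
    have hpd : p ∈ d.items := List.mem_of_mem_filter hpF
    have hcv : (c, p.2) ∈ d.items := by rw [← hpc]; exact hpd
    have := foldl_if_filter' d.items (fun p => c = p.1)
      (fun sd p => sd.insert p.1 (PySem.Int.toStr p.2)) sd
    rw [this, filter_key_single d.items c p.2 hknd hcv]
    have hv : d.getD c 0 = p.2 := PySem.Dict.getD_of_mem_items d hcv hknd 0
    simp [hv]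
  rw [h3]
  -- A, step 3: the fresh-key fold appends in order
  have h4 : (char.foldl (fun sd c => sd.insert c (PySem.Int.toStr (d.getD c 0)))
      PySem.Dict.empty).items
      = char.map (fun c => (c, PySem.Int.toStr (d.getD c 0))) := by
    rw [PySem.Dict.items_foldl_insert_fresh char (fun c => c)
      (fun c => PySem.Int.toStr (d.getD c 0)) PySem.Dict.empty
      (fun a _ => PySem.Dict.contains_empty a) (by simpa using hcnd)]
    simp [PySem.Dict.empty]
  rw [h4]
  -- B: the sorted filtered pass gives the same list
  have h5 : PySem.List.sorted (F.map (fun p => (p.1, PySem.Int.toStr p.2))) (fun p => p.1) false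
      = char.map (fun c => (c, PySem.Int.toStr (d.getD c 0))) := by
    apply PySem.List.sorted_eq_of_perm_of_pairwise_lt
    · have : (F.map Prod.fst).map (fun c => (c, PySem.Int.toStr (d.getD c 0)))
          = F.map (fun p => (p.1, PySem.Int.toStr p.2)) := by
        rw [List.map_map]
        apply List.map_congr_left
        intro p hp
        have : d.getD p.1 0 = p.2 :=
          PySem.Dict.getD_of_mem_items d (List.mem_of_mem_filter hp) hknd 0
        simp [Function.comp, this]
      have hm := hcp.map (fun c => (c, PySem.Int.toStr (d.getD c 0)))
      rw [this] at hm
      exact hm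
    · rw [List.pairwise_map]
      exact hclt
  rw [h5]
  have hbnd : ((char.map (fun c => (c, PySem.Int.toStr (d.getD c 0)))).map Prod.fst).Nodup := by
    rw [List.map_map]
    simpa [Function.comp_def] using hcnd
  rw [items_ofList_of_nodup _ hbnd]

-- ===== VERDICT (by name: the statement is the Claim_ definition above) =====
theorem get_sort_list_spec : Claim_equal_get_sort_list := by
  intro dict_list _
  exact get_sort_list_eq dict_list
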